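-- pv_equiv track=rewrite | github.com/devyoungk/Algorithm | Python3/프로그래머스/0/181867. x 사이의 개수/x 사이의 개수.py | solution
-- ===== SOURCE A (Python) =====
-- def solution(myString):
--     answer = []
--     while 'x' in myString:
--         n = myString.index('x')
--         answer.append(n)
--         myString = myString[n+1:]
--     answer.append(len(myString))
--     return answer
-- ===== SOURCE B (Python) =====
-- def solution(myString):
--     answer = []
--     cnt = 0
--     for c in myString:
--         if c == 'x':
--             answer.append(cnt)
--             cnt = 0
--         else:
--             cnt += 1
--     answer.append(cnt)
--     return answer
-- ===== Notes on version B (the rewrite author's own statement) =====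
-- stated objective: alternative
-- what changed: Replaces the while-loop that repeatedly searches with .index and reslices the string by a single linear pass maintaining a running segment-length counter; asymptotically O(n) vs A's worst-case O(n^2), though CPython's C-level .index makes A fast in practice.
import Mathlib
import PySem

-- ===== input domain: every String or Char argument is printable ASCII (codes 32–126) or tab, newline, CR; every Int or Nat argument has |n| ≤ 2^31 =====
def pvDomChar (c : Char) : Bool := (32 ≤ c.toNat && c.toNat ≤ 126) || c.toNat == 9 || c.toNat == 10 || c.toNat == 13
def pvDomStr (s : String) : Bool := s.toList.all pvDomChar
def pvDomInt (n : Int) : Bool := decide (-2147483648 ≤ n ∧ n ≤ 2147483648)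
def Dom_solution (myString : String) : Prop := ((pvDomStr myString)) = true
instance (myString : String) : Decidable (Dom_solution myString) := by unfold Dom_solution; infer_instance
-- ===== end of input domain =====

-- B replaces A's repeated .index search + reslicing with a single linear pass keeping a running counter (alternative algorithm).


-- ===== PORT A =====
-- while 'x' in myString: n = myString.index('x'); answer.append(n); myString = myString[n+1:]
-- then answer.append(len(myString)).  Strings handled as List Char; .index is guarded by the
-- membership test, so List.idxOf is exact here.
def solGoA (cs : List Char) (answer : List Int) : List Int :=
  if _h : 'x' ∈ cs then
    let n := cs.idxOf 'x'
    solGoA (cs.drop (n + 1)) (answer ++ [(n : Int)])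
  else
    answer ++ [(cs.length : Int)]
termination_by cs.length
decreasing_by
  have := List.idxOf_lt_length_of_mem _h
  simp only [List.length_drop]
  omega

def solution (myString : String) : List Int := solGoA myString.toList []

-- ===== PORT B =====
-- one pass with a running counter; append the counter at each 'x' and once at the end
def solGoB (cs : List Char) (cnt : Int) (answer : List Int) : List Int :=
  match cs with
  | [] => answer ++ [cnt]
  | c :: rest =>
      if c = 'x' then solGoB rest 0 (answer ++ [cnt])
      else solGoB rest (cnt + 1) answer

def solution_alt (myString : String) : List Int := solGoB myString.toList 0 []

-- ===== PRECONDITION & SPEC =====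
def Spec_solution (myString : String) (out : List Int) : Prop := out = solution_alt myString
instance (myString : String) (out : List Int) : Decidable (Spec_solution myString out) := by unfold Spec_solution; infer_instance

-- ===== CLAIM (what is proved, stated in full; the proofs are below) =====
def Claim_equal_solution : Prop := ∀ (myString : String), Dom_solution myString → Spec_solution myString (solution myString)

-- ===== LEMMAS AND PROOFS =====
-- B's pass, unrolled to the next 'x' (or the end): it appends cnt + (distance to the next 'x').
lemma solGoB_spec (cs : List Char) (cnt : Int) (answer : List Int) :
    solGoB cs cnt answer =
      if 'x' ∈ cs then
        solGoB (cs.drop (cs.idxOf 'x' + 1)) 0 (answer ++ [cnt + (cs.idxOf 'x' : Int)])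
      else answer ++ [cnt + (cs.length : Int)] := by
  induction cs generalizing cnt answer with
  | nil => simp [solGoB]
  | cons c rest ih =>
    by_cases hc : c = 'x'
    · subst hc
      simp [solGoB, List.idxOf_cons_self]
    · have hmem : ('x' ∈ c :: rest) ↔ ('x' ∈ rest) := by
        simp [List.mem_cons, eq_comm, hc]
      rw [solGoB, if_neg hc, ih]
      by_cases hr : 'x' ∈ rest
      · rw [if_pos hr, if_pos (hmem.mpr hr)]
        have hidx : (c :: rest).idxOf 'x' = rest.idxOf 'x' + 1 := by
          simp [hc]
        rw [hidx]
        have : ((rest.idxOf 'x' + 1 : Nat) : Int) = (rest.idxOf 'x' : Int) + 1 := by push_cast; ring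
        simp only [List.drop_succ_cons, this]
        ring_nf
      · rw [if_neg hr, if_neg (fun h => hr (hmem.mp h))]
        simp only [List.length_cons]
        have : ((rest.length + 1 : Nat) : Int) = (rest.length : Int) + 1 := by push_cast; ring
        rw [this]
        ring_nf

lemma solGoA_eq_solGoB (cs : List Char) (answer : List Int) :
    solGoA cs answer = solGoB cs 0 answer := by
  induction hn : cs.length using Nat.strong_induction_on generalizing cs answer with
  | _ n ih =>
    by_cases h : 'x' ∈ cs
    · rw [solGoA, dif_pos h, solGoB_spec, if_pos h]
      have hlt : cs.idxOf 'x' < cs.length := List.idxOf_lt_length_of_mem h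
      have : (cs.drop (cs.idxOf 'x' + 1)).length < n := by
        simp only [List.length_drop]; omega
      rw [ih _ this _ _ rfl]
      norm_num
    · rw [solGoA, dif_neg h, solGoB_spec, if_neg h]
      simp

-- ===== VERDICT (by name: the statement is the Claim_ definition above) =====
theorem solution_spec : Claim_equal_solution := by
  intro s _
  unfold Spec_solution solution solution_alt
  exact solGoA_eq_solGoB _ _
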